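-- pv_equiv track=rewrite | github.com/ktsujimoto0624-cmd/mahjong-ai | mahjong/yaku.py | _is_sanshoku
-- ===== SOURCE A (Python) =====
-- def _is_sanshoku(all_mentsu):
--     """三色同順: 同じ数字の順子が3色"""
--     shuntsu = [t for mt, t in all_mentsu if mt == "shuntsu"]
--     for s in shuntsu:
--         num = s % 9
--         if num in [t % 9 for t in shuntsu if t // 9 == 0] and \
--            num in [t % 9 for t in shuntsu if t // 9 == 1] and \
--            num in [t % 9 for t in shuntsu if t // 9 == 2]:
--             return True
--     return False
-- ===== SOURCE B (Python) =====
-- def _is_sanshoku(all_mentsu):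
--     nums = [{t % 9 for mt, t in all_mentsu if mt == "shuntsu" and t // 9 == suit}
--             for suit in range(3)]
--     return bool(nums[0] & nums[1] & nums[2])
-- ===== Notes on version B (the rewrite author's own statement) =====
-- stated objective: simpler
-- what changed: Replaces A's outer per-shuntsu loop with three inline per-suit list scans by building one set of numbers per suit in a single grouping pass and returning whether their three-way intersection is nonempty.
import Mathlib
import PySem

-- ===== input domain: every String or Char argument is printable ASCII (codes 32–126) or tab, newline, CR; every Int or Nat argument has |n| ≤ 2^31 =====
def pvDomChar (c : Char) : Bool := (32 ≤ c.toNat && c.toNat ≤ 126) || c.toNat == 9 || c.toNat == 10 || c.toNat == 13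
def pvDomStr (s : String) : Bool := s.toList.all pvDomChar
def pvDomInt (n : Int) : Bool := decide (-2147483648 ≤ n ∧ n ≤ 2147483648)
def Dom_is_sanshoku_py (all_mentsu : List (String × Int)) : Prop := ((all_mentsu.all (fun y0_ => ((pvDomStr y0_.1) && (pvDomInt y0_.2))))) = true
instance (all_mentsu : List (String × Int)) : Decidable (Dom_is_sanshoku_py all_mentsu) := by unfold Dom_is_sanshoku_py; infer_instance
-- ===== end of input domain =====

-- B groups shuntsu numbers into a set per suit in one pass and tests the three-way
-- intersection for emptiness, instead of A's loop over every shuntsu with three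
-- inline per-suit membership scans.

-- ===== PORT A =====
-- the three inline list comprehensions of A's condition
def isansSuitNums (shuntsu : List Int) (suit : Int) : List Int :=
  (shuntsu.filter (fun t => PySem.Int.floordiv t 9 == suit)).map (fun t => PySem.Int.mod t 9)

-- the 'for s in shuntsu: … return True / return False' loop
def isansLoop (shuntsu : List Int) : List Int → Bool
  | [] => false
  | s :: rest =>
    let num := PySem.Int.mod s 9
    if (isansSuitNums shuntsu 0).contains num
        && (isansSuitNums shuntsu 1).contains num
        && (isansSuitNums shuntsu 2).contains num
    then true
    else isansLoop shuntsu rest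

def is_sanshoku_py (all_mentsu : List (String × Int)) : Bool :=
  let shuntsu := (all_mentsu.filter (fun p => p.1 == "shuntsu")).map (fun p => p.2)
  isansLoop shuntsu shuntsu

-- ===== PORT B =====
-- {t % 9 for mt, t in all_mentsu if mt == "shuntsu" and t // 9 == suit}
def isansSuitSet (all_mentsu : List (String × Int)) (suit : Int) : PySem.Set Int :=
  PySem.Set.ofList
    ((all_mentsu.filter
        (fun p => p.1 == "shuntsu" && PySem.Int.floordiv p.2 9 == suit)).map
      (fun p => PySem.Int.mod p.2 9))

def is_sanshoku_py_alt (all_mentsu : List (String × Int)) : Bool :=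
  let nums := (PySem.List.pyRange 0 3 1).map (fun suit => isansSuitSet all_mentsu suit)
  !(PySem.Set.inter (PySem.Set.inter (nums.getD 0 []) (nums.getD 1 [])) (nums.getD 2 [])).isEmpty

-- ===== PRECONDITION & SPEC =====
def Spec_is_sanshoku_py (all_mentsu : List (String × Int)) (out : Bool) : Prop := out = is_sanshoku_py_alt all_mentsu
instance (all_mentsu : List (String × Int)) (out : Bool) : Decidable (Spec_is_sanshoku_py all_mentsu out) := by unfold Spec_is_sanshoku_py; infer_instance

-- ===== CLAIM (what is proved, stated in full; the proofs are below) =====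
def Claim_equal_is_sanshoku_py : Prop := ∀ (all_mentsu : List (String × Int)), Dom_is_sanshoku_py all_mentsu → Spec_is_sanshoku_py all_mentsu (is_sanshoku_py all_mentsu)

-- ===== LEMMAS AND PROOFS =====

-- membership in A's per-suit number list
theorem mem_isansSuitNums (shuntsu : List Int) (suit n : Int) :
    n ∈ isansSuitNums shuntsu suit ↔
      ∃ t ∈ shuntsu, PySem.Int.floordiv t 9 = suit ∧ PySem.Int.mod t 9 = n := by
  simp [isansSuitNums, List.mem_map, List.mem_filter]
  constructor
  · rintro ⟨t, ⟨ht, hd⟩, hm⟩; exact ⟨t, ht, hd, hm⟩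
  · rintro ⟨t, ht, hd, hm⟩; exact ⟨t, ⟨ht, hd⟩, hm⟩

-- A's loop returns true iff some element of the scanned list passes the triple test
theorem isansLoop_iff (shuntsu l : List Int) :
    isansLoop shuntsu l = true ↔
      ∃ s ∈ l, PySem.Int.mod s 9 ∈ isansSuitNums shuntsu 0 ∧
               PySem.Int.mod s 9 ∈ isansSuitNums shuntsu 1 ∧
               PySem.Int.mod s 9 ∈ isansSuitNums shuntsu 2 := by
  induction l with
  | nil => simp [isansLoop]
  | cons s rest ih =>
    by_cases h : (isansSuitNums shuntsu 0).contains (PySem.Int.mod s 9)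
        && (isansSuitNums shuntsu 1).contains (PySem.Int.mod s 9)
        && (isansSuitNums shuntsu 2).contains (PySem.Int.mod s 9)
    · simp only [isansLoop, h, if_pos]
      simp only [Bool.and_eq_true, List.contains_eq_mem, decide_eq_true_eq] at h
      simp only [true_iff]
      exact ⟨s, List.mem_cons_self .., h.1.1, h.1.2, h.2⟩
    · rw [Bool.not_eq_true] at h
      simp only [isansLoop, h, Bool.false_eq_true, reduceIte, ih]
      constructor
      · rintro ⟨t, ht, hc⟩; exact ⟨t, List.mem_cons_of_mem _ ht, hc⟩
      · rintro ⟨t, ht, hc⟩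
        rcases List.mem_cons.mp ht with rfl | ht'
        · simp only [List.contains_eq_mem, Bool.and_eq_false_iff, decide_eq_false_iff_not] at h
          rcases h with (h | h) | h
          exacts [absurd hc.1 h, absurd hc.2.1 h, absurd hc.2.2 h]
        · exact ⟨t, ht', hc⟩

-- membership in B's per-suit set
theorem mem_isansSuitSet (all_mentsu : List (String × Int)) (suit n : Int) :
    n ∈ isansSuitSet all_mentsu suit ↔
      ∃ p ∈ all_mentsu, p.1 = "shuntsu" ∧ PySem.Int.floordiv p.2 9 = suit ∧
        PySem.Int.mod p.2 9 = n := by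
  simp [isansSuitSet, PySem.Set.mem_ofList, List.mem_map, List.mem_filter]
  aesop

-- the per-suit conditions of A and B describe the same numbers
theorem suitNums_iff_suitSet (all_mentsu : List (String × Int)) (suit n : Int) :
    n ∈ isansSuitNums ((all_mentsu.filter (fun p => p.1 == "shuntsu")).map (fun p => p.2)) suit ↔
      n ∈ isansSuitSet all_mentsu suit := by
  rw [mem_isansSuitNums, mem_isansSuitSet]
  constructor
  · rintro ⟨t, ht, hd, hm⟩
    simp only [List.mem_map, List.mem_filter, beq_iff_eq] at ht
    rcases ht with ⟨p, ⟨hp, hs⟩, rfl⟩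
    exact ⟨p, hp, hs, hd, hm⟩
  · rintro ⟨p, hp, hs, hd, hm⟩
    refine ⟨p.2, ?_, hd, hm⟩
    simp only [List.mem_map, List.mem_filter, beq_iff_eq]
    exact ⟨p, ⟨hp, hs⟩, rfl⟩

theorem alt_iff (all_mentsu : List (String × Int)) :
    is_sanshoku_py_alt all_mentsu = true ↔
      ∃ n, n ∈ isansSuitSet all_mentsu 0 ∧ n ∈ isansSuitSet all_mentsu 1 ∧
           n ∈ isansSuitSet all_mentsu 2 := by
  simp only [is_sanshoku_py_alt]
  have hr : PySem.List.pyRange 0 3 1 = [0, 1, 2] := by decide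
  rw [hr]
  simp only [List.map, List.getD]
  rw [Bool.not_eq_true', List.isEmpty_eq_false_iff_exists_mem]
  · constructor
    · rintro ⟨n, hn⟩
      rw [PySem.Set.mem_inter, PySem.Set.mem_inter] at hn
      exact ⟨n, hn.1.1, hn.1.2, hn.2⟩
    · rintro ⟨n, h0, h1, h2⟩
      exact ⟨n, by rw [PySem.Set.mem_inter, PySem.Set.mem_inter]; exact ⟨⟨h0, h1⟩, h2⟩⟩

-- ===== VERDICT (by name: the statement is the Claim_ definition above) =====
theorem is_sanshoku_py_spec : Claim_equal_is_sanshoku_py := by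
  intro all_mentsu _
  unfold Spec_is_sanshoku_py
  rw [Bool.eq_iff_iff, is_sanshoku_py, alt_iff, isansLoop_iff]
  constructor
  · rintro ⟨s, _, h0, h1, h2⟩
    exact ⟨PySem.Int.mod s 9,
      (suitNums_iff_suitSet ..).mp h0, (suitNums_iff_suitSet ..).mp h1,
      (suitNums_iff_suitSet ..).mp h2⟩
  · rintro ⟨n, h0, h1, h2⟩
    rcases (mem_isansSuitSet ..).mp h0 with ⟨p, hp, hs, hd, hm⟩
    refine ⟨p.2, ?_, ?_, ?_, ?_⟩
    · simp only [List.mem_map, List.mem_filter, beq_iff_eq]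
      exact ⟨p, ⟨hp, hs⟩, rfl⟩
    all_goals rw [hm, suitNums_iff_suitSet]
    exacts [h0, h1, h2]
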